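-- pv_equiv track=rewrite | github.com/Vishal1995-dev/Random-Codes | Leetcode-1784.py | checkOnesSegment
-- ===== SOURCE A (Python) =====
-- def checkOnesSegment(s):
--     """
--     :type s: str
--     :rtype: bool
--     """
--     i=0
--     l=len(s)
--     while(i<l):
--         if(s[i]=='1'):
--             while(i<l and s[i]=='1'):
--                 i+=1
--             break
--         else:
--             i+=1
--     if(i==l):
--         return True
--     while(i<l):
--         if(s[i]=='1'):
--             return False
--         i+=1
--     return True
-- ===== SOURCE B (Python) =====
-- def checkOnesSegment(s):
--     # Count the maximal runs of '1' in one closed-form pass: a run starts at each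
--     # position holding '1' whose predecessor (or virtual '0' before the string) is not '1'.
--     runs = sum(1 for prev, c in zip('0' + s, s) if c == '1' and prev != '1')
--     return runs <= 1
-- ===== Notes on version B (the rewrite author's own statement) =====
-- stated objective: simpler
-- what changed: Replaces A's stateful three-loop index walk (find first run, skip it, scan for a later '1' with early returns) by a single closed-form count of run starts (positions where '1' follows a non-'1'), compared to 1.
import Mathlib
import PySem

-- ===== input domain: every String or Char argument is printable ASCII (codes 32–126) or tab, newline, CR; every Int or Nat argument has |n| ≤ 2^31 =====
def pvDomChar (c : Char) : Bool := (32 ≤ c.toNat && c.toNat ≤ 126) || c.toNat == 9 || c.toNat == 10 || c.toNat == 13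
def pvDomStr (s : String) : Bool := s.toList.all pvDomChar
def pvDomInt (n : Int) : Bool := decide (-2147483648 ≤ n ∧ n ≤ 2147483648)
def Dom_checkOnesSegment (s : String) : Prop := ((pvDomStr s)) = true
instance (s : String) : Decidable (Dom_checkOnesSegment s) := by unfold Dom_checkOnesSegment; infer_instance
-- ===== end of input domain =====

-- B replaces A's stateful three-loop index walk by one closed-form count of run starts; objective: simpler.

-- ===== PORT A =====
-- inner while: while(i<l and s[i]=='1'): i+=1
def pvSkipOnes : List Char → List Char
  | [] => []
  | c :: r => if c = '1' then pvSkipOnes r else c :: r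

-- first while loop: advance until s[i]=='1', then skip the run and break; none = reached end (i==l)
def pvFindRun : List Char → Option (List Char)
  | [] => none
  | c :: r => if c = '1' then some (pvSkipOnes r) else pvFindRun r

-- last while loop: return False on any later '1'
def pvNoMoreOnes : List Char → Bool
  | [] => true
  | c :: r => if c = '1' then false else pvNoMoreOnes r

def checkOnesSegment (s : String) : Bool :=
  match pvFindRun s.toList with
  | none => true          -- if(i==l): return True
  | some rest => pvNoMoreOnes rest

-- ===== PORT B =====
def checkOnesSegment_alt (s : String) : Bool :=
  decide ((((('0' :: s.toList).zip s.toList).filter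
      (fun pc => pc.2 = '1' ∧ pc.1 ≠ '1')).length : Nat) ≤ 1)

-- ===== PRECONDITION & SPEC =====
def Spec_checkOnesSegment (s : String) (out : Bool) : Prop := out = checkOnesSegment_alt s
instance (s : String) (out : Bool) : Decidable (Spec_checkOnesSegment s out) := by unfold Spec_checkOnesSegment; infer_instance

-- ===== CLAIM (what is proved, stated in full; the proofs are below) =====
def Claim_equal_checkOnesSegment : Prop := ∀ (s : String), Dom_checkOnesSegment s → Spec_checkOnesSegment s (checkOnesSegment s)

-- ===== LEMMAS AND PROOFS =====
-- number of run starts in cs when the preceding character is p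
def pvRuns (p : Char) (cs : List Char) : Nat :=
  (((p :: cs).zip cs).filter (fun pc => pc.2 = '1' ∧ pc.1 ≠ '1')).length

theorem pvRuns_nil (p : Char) : pvRuns p [] = 0 := rfl

theorem pvRuns_cons (p c : Char) (r : List Char) :
    pvRuns p (c :: r) = (if c = '1' ∧ p ≠ '1' then 1 else 0) + pvRuns c r := by
  simp only [pvRuns, List.zip, List.zipWith, List.filter_cons]
  by_cases h : c = '1' <;> by_cases h2 : p = '1' <;> simp [h, h2, Nat.add_comm]

theorem pvNoMoreOnes_eq (cs : List Char) (p : Char) (hp : p ≠ '1') :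
    pvNoMoreOnes cs = decide (pvRuns p cs = 0) := by
  induction cs generalizing p with
  | nil => simp [pvNoMoreOnes, pvRuns_nil]
  | cons c r ih =>
    by_cases hc : c = '1'
    · simp [pvNoMoreOnes, hc, pvRuns_cons, hp]
    · simp [pvNoMoreOnes, hc, pvRuns_cons, ih c hc]

theorem pvSkipOnes_eq (cs : List Char) :
    pvNoMoreOnes (pvSkipOnes cs) = decide (pvRuns '1' cs = 0) := by
  induction cs with
  | nil => simp [pvSkipOnes, pvNoMoreOnes, pvRuns_nil]
  | cons c r ih =>
    by_cases hc : c = '1'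
    · simp [pvSkipOnes, hc, pvRuns_cons, ih]
    · simp only [pvSkipOnes, if_neg hc]
      rw [pvNoMoreOnes_eq (c :: r) '0' (by decide), pvRuns_cons, pvRuns_cons]
      simp [hc]

theorem pvMain (cs : List Char) (p : Char) (hp : p ≠ '1') :
    (match pvFindRun cs with
     | none => true
     | some rest => pvNoMoreOnes rest) = decide (pvRuns p cs ≤ 1) := by
  induction cs generalizing p with
  | nil => simp [pvFindRun, pvRuns_nil]
  | cons c r ih =>
    by_cases hc : c = '1'
    · rw [show pvFindRun (c :: r) = some (pvSkipOnes r) from by simp [pvFindRun, hc]]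
      show pvNoMoreOnes (pvSkipOnes r) = _
      rw [pvSkipOnes_eq r, pvRuns_cons]
      simp [hc, hp]
    · rw [show pvFindRun (c :: r) = pvFindRun r from by simp [pvFindRun, hc]]
      rw [pvRuns_cons]
      simp only [hc, false_and, if_false, Nat.zero_add]
      exact ih c hc

-- ===== VERDICT (by name: the statement is the Claim_ definition above) =====
theorem checkOnesSegment_spec : Claim_equal_checkOnesSegment := by
  intro s _
  show checkOnesSegment s = checkOnesSegment_alt s
  have h := pvMain s.toList '0' (by decide)
  simpa [checkOnesSegment, checkOnesSegment_alt, pvRuns] using h
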